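-- pv_equiv track=rewrite | github.com/tanisheesh/BazaarOps | agent-service/agents/coordinator_agent.py | align_with_goal
-- ===== SOURCE A (Python) =====
-- def align_with_goal(goal: str, options: list) -> dict:
--     """
--     Pick the best option from a list based on the owner's goal.
--     Each option should be a dict with at least a 'type' key.
--     """
--     if not options:
--         return {}
--
--     goal_priority_map = {
--         "maximize_profit": ["reorder", "credit_block", "fraud_block"],
--         "increase_customers": ["re_engagement", "reorder", "credit_approve"],
--         "reduce_risk": ["credit_block", "fraud_block", "reorder"],
--         "balanced": [],
--     }
--
--     preferred_types = goal_priority_map.get(goal, [])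
--
--     for preferred in preferred_types:
--         for option in options:
--             if option.get("type") == preferred:
--                 return option
--
--     # Default: return first option
--     return options[0]
-- ===== SOURCE B (Python) =====
-- def align_with_goal(goal: str, options: list) -> dict:
--     """Score each option by the position of its 'type' in the goal's priority
--     list (options whose type is not preferred score worst) and return the
--     stable minimum: the earliest option with the best score."""
--     if not options:
--         return {}
--
--     goal_priority_map = {
--         "maximize_profit": ["reorder", "credit_block", "fraud_block"],
--         "increase_customers": ["re_engagement", "reorder", "credit_approve"],
--         "reduce_risk": ["credit_block", "fraud_block", "reorder"],
--         "balanced": [],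
--     }
--
--     prefs = goal_priority_map.get(goal, [])
--     worst = len(prefs)
--
--     def rank(option):
--         t = option.get("type")
--         return prefs.index(t) if t in prefs else worst
--
--     return min(options, key=rank)
-- ===== Notes on version B (the rewrite author's own statement) =====
-- stated objective: alternative
-- what changed: Instead of A's nested priority-then-options scans, B assigns each option a numeric rank (position of its 'type' in the goal's priority list, worst if absent) and returns the stable minimum over the options by that rank.
import Mathlib
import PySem

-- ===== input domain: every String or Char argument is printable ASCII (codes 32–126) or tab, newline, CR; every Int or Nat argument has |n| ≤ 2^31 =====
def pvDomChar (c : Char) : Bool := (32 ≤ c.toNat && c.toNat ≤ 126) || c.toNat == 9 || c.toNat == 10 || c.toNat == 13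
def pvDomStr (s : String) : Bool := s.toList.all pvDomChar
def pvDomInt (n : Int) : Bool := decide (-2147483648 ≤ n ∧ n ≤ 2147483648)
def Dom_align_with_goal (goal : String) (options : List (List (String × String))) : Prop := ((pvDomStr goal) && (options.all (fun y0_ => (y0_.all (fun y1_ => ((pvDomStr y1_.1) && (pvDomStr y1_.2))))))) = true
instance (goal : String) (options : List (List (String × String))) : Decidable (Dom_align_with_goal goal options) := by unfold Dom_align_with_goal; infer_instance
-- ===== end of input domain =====

-- B replaces A's nested priority-then-options scans by a numeric rank per option
-- (position of its 'type' in the goal's priority list, worst when absent) and a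
-- single stable minimum over the options by that rank; objective: alternative.

-- option.get("type"): first-match lookup in the association list representing the option dict
def pvGetType (o : List (String × String)) : Option String :=
  (o.find? (fun p => p.1 == "type")).map (·.2)

-- the goal_priority_map literal, identical in both Python sources
def pvGPM : PySem.Dict String (List String) := PySem.Dict.mk
  [("maximize_profit", ["reorder", "credit_block", "fraud_block"]),
   ("increase_customers", ["re_engagement", "reorder", "credit_approve"]),
   ("reduce_risk", ["credit_block", "fraud_block", "reorder"]),
   ("balanced", [])]

-- ===== PORT A =====
-- inner loop: for option in options: if option.get("type") == preferred: return option
def pvInnerScan (preferred : String) : List (List (String × String)) → Option (List (String × String))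
  | [] => none
  | o :: rest => if pvGetType o == some preferred then some o else pvInnerScan preferred rest

-- outer loop over preferred_types
def pvOuterScan (options : List (List (String × String))) : List String → Option (List (String × String))
  | [] => none
  | p :: ps =>
    match pvInnerScan p options with
    | some o => some o
    | none => pvOuterScan options ps

def align_with_goal (goal : String) (options : List (List (String × String))) : List (String × String) :=
  if options.isEmpty then []
  else
    match pvOuterScan options (PySem.Dict.getD pvGPM goal []) with
    | some o => o
    | none => options.headD []

-- ===== PORT B =====
-- rank(option) = prefs.index(t) if t in prefs else worst   (t = option.get("type");
-- a missing 'type' gives t = None, never a member of a list of strings, hence worst)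
def pvRank (prefs : List String) (o : List (String × String)) : Nat :=
  match pvGetType o with
  | none => prefs.length
  | some t => if prefs.contains t then prefs.idxOf t else prefs.length

-- one comparison step of Python's min(options, key=rank): keep the current best
-- unless the new element's rank is strictly smaller
def pvMinStep (prefs : List String) (best : Nat × List (String × String)) (x : List (String × String)) :
    Nat × List (String × String) :=
  if pvRank prefs x < best.1 then (pvRank prefs x, x) else best

def align_with_goal_alt (goal : String) (options : List (List (String × String))) : List (String × String) :=
  if options.isEmpty then []
  else
    let prefs := PySem.Dict.getD pvGPM goal []
    match options with
    | [] => []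
    | o :: os => (os.foldl (pvMinStep prefs) (pvRank prefs o, o)).2

-- ===== PRECONDITION & SPEC =====
def Spec_align_with_goal (goal : String) (options : List (List (String × String))) (out : List (String × String)) : Prop := out = align_with_goal_alt goal options
instance (goal : String) (options : List (List (String × String))) (out : List (String × String)) : Decidable (Spec_align_with_goal goal options out) := by unfold Spec_align_with_goal; infer_instance

-- ===== CLAIM (what is proved, stated in full; the proofs are below) =====
def Claim_equal_align_with_goal : Prop := ∀ (goal : String) (options : List (List (String × String))), Dom_align_with_goal goal options → Spec_align_with_goal goal options (align_with_goal goal options)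

-- ===== LEMMAS AND PROOFS =====

-- "first minimal element" reference function: first element attaining the minimal key
def pvFirstMin (k : List (String × String) → Nat) : List (List (String × String)) → Option (List (String × String))
  | [] => none
  | o :: rest =>
    match pvFirstMin k rest with
    | none => some o
    | some b => some (if k o ≤ k b then o else b)

theorem firstMin_mem (k : List (String × String) → Nat) (l : List (List (String × String)))
    (b : List (String × String)) (h : pvFirstMin k l = some b) : b ∈ l := by
  induction l with
  | nil => simp [pvFirstMin] at h
  | cons o rest ih =>
    unfold pvFirstMin at h
    cases hr : pvFirstMin k rest with
    | none => rw [hr] at h; simp at h; simp [h]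
    | some c =>
      rw [hr] at h; simp at h
      by_cases hc : k o ≤ k c
      · simp [hc] at h; simp [h]
      · simp [hc] at h; subst h; exact List.mem_cons_of_mem _ (ih hr)

-- Python's min fold computes pvFirstMin
theorem foldl_minStep_eq (prefs : List String) (rest : List (List (String × String)))
    (b : List (String × String)) :
    (rest.foldl (pvMinStep prefs) (pvRank prefs b, b)).2 =
      (match pvFirstMin (pvRank prefs) rest with
       | none => b
       | some c => if pvRank prefs c < pvRank prefs b then c else b) := by
  induction rest generalizing b with
  | nil => rfl
  | cons x rest ih =>
    simp only [List.foldl_cons]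
    have hfm : pvFirstMin (pvRank prefs) (x :: rest) =
        (match pvFirstMin (pvRank prefs) rest with
         | none => some x
         | some c => some (if pvRank prefs x ≤ pvRank prefs c then x else c)) := rfl
    rw [hfm]
    by_cases hxb : pvRank prefs x < pvRank prefs b
    · have hstep : pvMinStep prefs (pvRank prefs b, b) x = (pvRank prefs x, x) := by
        simp [pvMinStep, hxb]
      rw [hstep, ih x]
      cases hr : pvFirstMin (pvRank prefs) rest with
      | none => dsimp only; rw [if_pos hxb]
      | some c =>
        dsimp only
        by_cases h2 : pvRank prefs x ≤ pvRank prefs c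
        · rw [if_neg (show ¬ pvRank prefs c < pvRank prefs x by omega), if_pos h2, if_pos hxb]
        · rw [if_pos (show pvRank prefs c < pvRank prefs x by omega), if_neg h2,
            if_pos (show pvRank prefs c < pvRank prefs b by omega)]
    · have hstep : pvMinStep prefs (pvRank prefs b, b) x = (pvRank prefs b, b) := by
        simp [pvMinStep, hxb]
      rw [hstep, ih b]
      cases hr : pvFirstMin (pvRank prefs) rest with
      | none => dsimp only; rw [if_neg hxb]
      | some c =>
        dsimp only
        by_cases h2 : pvRank prefs x ≤ pvRank prefs c
        · rw [if_neg (show ¬ pvRank prefs c < pvRank prefs b by omega), if_pos h2, if_neg hxb]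
        · rw [if_neg h2]

theorem rank_cons (p : String) (ps : List String) (o : List (String × String)) :
    pvRank (p :: ps) o = if pvGetType o == some p then 0 else pvRank ps o + 1 := by
  unfold pvRank
  cases ht : pvGetType o with
  | none => simp
  | some t =>
    by_cases htp : t = p
    · subst htp; simp
    · have h1 : ((some t : Option String) == some p) = false := by simp [htp]
      have h2 : ((p == t) : Bool) = false := by simp [Ne.symm htp]
      simp only [h1, Bool.false_eq_true, if_false, List.contains_cons]
      by_cases hc : ps.contains t = true
      · simp only [hc, if_true]
        rw [List.idxOf_cons]
        simp [h2]
      · have hmem : t ∉ ps := by simpa using hc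
        simp [htp, hmem]

theorem innerScan_some_type (p : String) (l : List (List (String × String)))
    (x : List (String × String)) (h : pvInnerScan p l = some x) :
    (pvGetType x == some p) = true := by
  induction l with
  | nil => simp [pvInnerScan] at h
  | cons o rest ih =>
    unfold pvInnerScan at h
    by_cases hp : (pvGetType o == some p) = true
    · rw [hp] at h; simp at h; subst h; exact hp
    · simp only [Bool.not_eq_true] at hp
      rw [hp] at h; simp at h; exact ih h

theorem innerScan_none (p : String) (l : List (List (String × String)))
    (h : pvInnerScan p l = none) :
    ∀ z ∈ l, (pvGetType z == some p) = false := by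
  induction l with
  | nil => intro z hz; simp at hz
  | cons o rest ih =>
    unfold pvInnerScan at h
    by_cases hp : (pvGetType o == some p) = true
    · rw [hp] at h; simp at h
    · simp only [Bool.not_eq_true] at hp
      rw [hp] at h; simp at h
      intro z hz
      rcases List.mem_cons.mp hz with rfl | hz
      · exact hp
      · exact ih h z hz

-- the head is returned when its key is minimal
theorem firstMin_head (k : List (String × String) → Nat) (o : List (String × String))
    (os : List (List (String × String))) (h : ∀ z ∈ os, k o ≤ k z) :
    pvFirstMin k (o :: os) = some o := by
  unfold pvFirstMin
  cases hr : pvFirstMin k os with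
  | none => rfl
  | some b =>
    have hb := firstMin_mem k os b hr
    simp [h b hb]

-- pvFirstMin only depends on key comparisons: shifting every key by one changes nothing
theorem firstMin_shift (k1 k2 : List (String × String) → Nat) (l : List (List (String × String)))
    (h : ∀ z ∈ l, k1 z = k2 z + 1) : pvFirstMin k1 l = pvFirstMin k2 l := by
  induction l with
  | nil => rfl
  | cons o rest ih =>
    have hrest : ∀ z ∈ rest, k1 z = k2 z + 1 := fun z hz => h z (List.mem_cons_of_mem _ hz)
    unfold pvFirstMin
    rw [ih hrest]
    cases hr : pvFirstMin k2 rest with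
    | none => rfl
    | some b =>
      have hb := firstMin_mem k2 rest b hr
      have h1 : k1 o = k2 o + 1 := h o (List.mem_cons_self)
      have h2 : k1 b = k2 b + 1 := hrest b hb
      by_cases hle : k2 o ≤ k2 b
      · have : k1 o ≤ k1 b := by omega
        simp [hle, this]
      · have : ¬ k1 o ≤ k1 b := by omega
        simp [hle, this]

theorem firstMin_innerScan_some (p : String) (ps : List String)
    (l : List (List (String × String))) (x : List (String × String))
    (h : pvInnerScan p l = some x) :
    pvFirstMin (pvRank (p :: ps)) l = some x := by
  induction l with
  | nil => simp [pvInnerScan] at h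
  | cons o rest ih =>
    unfold pvInnerScan at h
    by_cases hp : (pvGetType o == some p) = true
    · rw [hp] at h; simp at h; subst h
      apply firstMin_head
      intro z _
      rw [rank_cons, hp]
      simp
    · simp only [Bool.not_eq_true] at hp
      rw [hp] at h; simp at h
      have hx := ih h
      have hxty := innerScan_some_type p rest x h
      unfold pvFirstMin
      rw [hx]
      have hko : pvRank (p :: ps) o = pvRank ps o + 1 := by rw [rank_cons, hp]; simp
      have hkx : pvRank (p :: ps) x = 0 := by rw [rank_cons, hxty]; simp
      have : ¬ pvRank (p :: ps) o ≤ pvRank (p :: ps) x := by omega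
      simp [this]

-- A's nested scan picks exactly the first option of minimal rank
theorem firstMin_eq_outerScan (prefs : List String) (l : List (List (String × String)))
    (hl : l ≠ []) :
    pvFirstMin (pvRank prefs) l =
      some (match pvOuterScan l prefs with | some x => x | none => l.headD []) := by
  induction prefs generalizing l with
  | nil =>
    cases l with
    | nil => exact absurd rfl hl
    | cons o os =>
      have : pvFirstMin (pvRank []) (o :: os) = some o := by
        apply firstMin_head
        intro z _
        unfold pvRank
        cases pvGetType o <;> cases pvGetType z <;> simp
      rw [this]; rfl
  | cons p ps ih =>
    cases hscan : pvInnerScan p l with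
    | some x =>
      rw [firstMin_innerScan_some p ps l x hscan]
      have houter : pvOuterScan l (p :: ps) = some x := by simp [pvOuterScan, hscan]
      rw [houter]
    | none =>
      have hall := innerScan_none p l hscan
      have hshift : ∀ z ∈ l, pvRank (p :: ps) z = pvRank ps z + 1 := by
        intro z hz
        rw [rank_cons, hall z hz]
        simp
      rw [firstMin_shift _ _ l hshift, ih l hl]
      have houter : pvOuterScan l (p :: ps) = pvOuterScan l ps := by simp [pvOuterScan, hscan]
      rw [houter]

-- ===== VERDICT (by name: the statement is the Claim_ definition above) =====
theorem align_with_goal_spec : Claim_equal_align_with_goal := by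
  intro goal options _
  unfold Spec_align_with_goal align_with_goal align_with_goal_alt
  cases options with
  | nil => rfl
  | cons o os =>
    simp only [List.isEmpty_cons, Bool.false_eq_true, if_false]
    rw [foldl_minStep_eq]
    have h := firstMin_eq_outerScan (PySem.Dict.getD pvGPM goal []) (o :: os) (by simp)
    unfold pvFirstMin at h
    cases hr : pvFirstMin (pvRank (PySem.Dict.getD pvGPM goal [])) os with
    | none =>
      rw [hr] at h
      simp only [] at h
      cases hos : pvOuterScan (o :: os) (PySem.Dict.getD pvGPM goal []) with
      | none => simp
      | some x =>
        rw [hos] at h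
        simp at h
        subst h
        simp
    | some c =>
      rw [hr] at h
      simp only [] at h
      by_cases hle : pvRank (PySem.Dict.getD pvGPM goal []) o ≤ pvRank (PySem.Dict.getD pvGPM goal []) c
      · have hnlt : ¬ pvRank (PySem.Dict.getD pvGPM goal []) c < pvRank (PySem.Dict.getD pvGPM goal []) o := by omega
        simp only [hle, if_true] at h
        simp only [hnlt, if_false]
        cases hos : pvOuterScan (o :: os) (PySem.Dict.getD pvGPM goal []) with
        | none => simp
        | some x => rw [hos] at h; simp at h; simp [h]
      · have hlt : pvRank (PySem.Dict.getD pvGPM goal []) c < pvRank (PySem.Dict.getD pvGPM goal []) o := by omega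
        simp only [hle, if_false] at h
        simp only [hlt, if_true]
        cases hos : pvOuterScan (o :: os) (PySem.Dict.getD pvGPM goal []) with
        | none => rw [hos] at h; simp at h; simp [h]
        | some x => rw [hos] at h; simp at h; simp [h]
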